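-- pv_equiv track=rewrite | github.com/ParkSeryu/CodingTest_Main | Joonlab/Queue/P1092.py | solution
-- ===== SOURCE A (Python) =====
-- from collections import deque
--
-- def solution(n, A):
--     m = [0, 0]
--     q = deque()
--     for i in A:
--         if i[0] == 1:
--             q.append(i[1])
--             if len(q) > m[0]:
--                 m[0] = len(q)
--                 m[1] = q[len(q) - 1]
--             elif len(q) == m[0]:
--                 if m[1] > q[len(q) - 1]:
--                     m[1] = q[len(q) - 1]
--         else:
--             q.popleft()
--
--     return m
-- ===== SOURCE B (Python) =====
-- def solution(n, A):
--     # pass 1: profile of post-operation queue lengths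
--     lengths = []
--     length = 0
--     for op in A:
--         length += 1 if op[0] == 1 else -1
--         lengths.append(length)
--     M = max(lengths, default=0)
--     if M == 0:
--         return [0, 0]
--     # pass 2: min appended value among appends whose post-length equals the global max
--     vmin = min(op[1] for op, L in zip(A, lengths) if op[0] == 1 and L == M)
--     return [M, vmin]
-- ===== Notes on version B (the rewrite author's own statement) =====
-- stated objective: alternative
-- what changed: Replaces A's single incremental pass with a real deque and a running (max,min) pair by a profile-then-reduce decomposition: first compute the list of post-operation queue lengths and its global maximum M, then take the minimum appended value over exactly the appends whose post-length equals M.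
import Mathlib
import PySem

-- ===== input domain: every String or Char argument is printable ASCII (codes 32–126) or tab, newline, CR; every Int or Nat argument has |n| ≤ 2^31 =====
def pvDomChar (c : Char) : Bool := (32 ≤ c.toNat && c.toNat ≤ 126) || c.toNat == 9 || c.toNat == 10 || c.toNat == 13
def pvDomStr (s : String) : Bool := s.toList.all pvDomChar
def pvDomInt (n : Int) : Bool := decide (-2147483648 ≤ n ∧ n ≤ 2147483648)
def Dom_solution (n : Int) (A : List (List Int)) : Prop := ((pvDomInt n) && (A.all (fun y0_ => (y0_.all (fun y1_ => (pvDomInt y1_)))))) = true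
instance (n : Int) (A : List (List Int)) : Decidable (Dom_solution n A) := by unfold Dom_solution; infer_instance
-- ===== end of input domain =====

-- B replaces A's incremental deque pass by a profile-then-reduce decomposition (lengths profile, global max, then min over max-level appends); alternative structure, same cost.


-- ===== PORT A =====
-- the loop body of A; state = ((m[0], m[1]), q)
def solutionStep (s : (Int × Int) × List Int) (i : List Int) : (Int × Int) × List Int :=
  if PySem.List.pyGetD i 0 0 == 1 then
    let q := s.2 ++ [PySem.List.pyGetD i 1 0]
    if s.1.1 < (q.length : Int) then
      (((q.length : Int), PySem.List.pyGetD q ((q.length : Int) - 1) 0), q)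
    else if (q.length : Int) == s.1.1 then
      if PySem.List.pyGetD q ((q.length : Int) - 1) 0 < s.1.2 then
        ((s.1.1, PySem.List.pyGetD q ((q.length : Int) - 1) 0), q)
      else (s.1, q)
    else (s.1, q)
  else
    (s.1, s.2.tail)  -- q.popleft(); Python raises IndexError on an empty deque — excluded by Pre_

def solution (n : Int) (A : List (List Int)) : List Int :=
  let r := A.foldl solutionStep ((0, 0), [])
  [r.1.1, r.1.2]

-- ===== PORT B =====
-- pass 1 of B: the list of post-operation queue lengths
def solutionLens (c : Int) : List (List Int) → List Int
  | [] => []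
  | op :: rest =>
      let l := c + (if PySem.List.pyGetD op 0 0 == 1 then 1 else -1)
      l :: solutionLens l rest

def solution_alt (n : Int) (A : List (List Int)) : List Int :=
  let ls := solutionLens 0 A
  let M := (PySem.List.max? ls (fun y => y)).getD 0    -- max(lengths, default=0)
  if M = 0 then [0, 0]
  else
    let cand := (A.zip ls).filterMap
      (fun p => if PySem.List.pyGetD p.1 0 0 == 1 && p.2 == M then some (PySem.List.pyGetD p.1 1 0) else none)
    [M, (PySem.List.min? cand (fun y => y)).getD 0]    -- min(...); nonempty whenever M ≠ 0 under Pre_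

-- ===== PRECONDITION & SPEC =====
-- Pre_ excludes exactly the inputs where Python A raises IndexError: an empty operation (i[0]),
-- an append operation of length 1 (i[1]), or a popleft performed on the empty deque.
def Pre_solution (n : Int) (A : List (List Int)) : Prop :=
  (∀ op ∈ A, op ≠ [] ∧ (PySem.List.pyGetD op 0 0 = 1 → 2 ≤ op.length)) ∧
  (∀ k < A.length + 1,
    0 ≤ ((A.take k).map (fun op => if PySem.List.pyGetD op 0 0 == 1 then (1 : Int) else -1)).sum)
instance (n : Int) (A : List (List Int)) : Decidable (Pre_solution n A) := by
  unfold Pre_solution; infer_instance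

def pvWitness_solution : Int × List (List Int) := (3, [[1, 5], [1, 2], [0], [1, 7]])

def Spec_solution (n : Int) (A : List (List Int)) (out : List Int) : Prop := out = solution_alt n A
instance (n : Int) (A : List (List Int)) (out : List Int) : Decidable (Spec_solution n A out) := by unfold Spec_solution; infer_instance

-- ===== CLAIM (what is proved, stated in full; the proofs are below) =====
def Claim_equal_solution : Prop := ∀ (n : Int) (A : List (List Int)), Dom_solution n A → Pre_solution n A → Spec_solution n A (solution n A)

-- ===== LEMMAS AND PROOFS =====

def pvDelta (op : List Int) : Int := if PySem.List.pyGetD op 0 0 == 1 then 1 else -1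
def pvBal (p : List (List Int)) : Int := (p.map pvDelta).sum
theorem pvLens_append (p q : List (List Int)) (c : Int) :
    solutionLens c (p ++ q) = solutionLens c p ++ solutionLens (c + pvBal p) q := by
  induction p generalizing c with
  | nil => simp [solutionLens, pvBal]
  | cons op rest ih =>
      simp only [List.cons_append, solutionLens, ih, pvBal, List.map_cons, List.sum_cons, pvDelta]
      rw [add_assoc]

theorem pvLens_length (p : List (List Int)) (c : Int) :
    (solutionLens c p).length = p.length := by
  induction p generalizing c with
  | nil => rfl
  | cons op rest ih => simp [solutionLens, ih]

theorem pvLens_mem (p : List (List Int)) (c : Int) (x : Int) (hx : x ∈ solutionLens c p) :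
    ∃ k, 0 < k ∧ k ≤ p.length ∧ x = c + pvBal (p.take k) := by
  induction p generalizing c with
  | nil => simp [solutionLens] at hx
  | cons op rest ih =>
      simp only [solutionLens, List.mem_cons] at hx
      rcases hx with h | h
      · exact ⟨1, by omega, by simp, by simp [h, pvBal, pvDelta]⟩
      · obtain ⟨k, hk0, hkle, hkx⟩ := ih _ h
        exact ⟨k + 1, by omega, by simp; omega, by
          simp [List.take_succ_cons, pvBal, pvDelta] at hkx ⊢
          omega⟩

def pvM (p : List (List Int)) : Int := (solutionLens 0 p).foldl max 0
def pvCandAt (p : List (List Int)) (m : Int) : List Int :=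
  (p.zip (solutionLens 0 p)).filterMap
    (fun x => if PySem.List.pyGetD x.1 0 0 == 1 && x.2 == m then some (PySem.List.pyGetD x.1 1 0) else none)

theorem pvBal_append_singleton (p : List (List Int)) (op : List Int) :
    pvBal (p ++ [op]) = pvBal p + pvDelta op := by
  simp [pvBal]

theorem pvM_append_singleton (p : List (List Int)) (op : List Int) :
    pvM (p ++ [op]) = max (pvM p) (pvBal p + pvDelta op) := by
  simp only [pvM, pvLens_append, List.foldl_append, solutionLens, pvDelta, zero_add]
  rfl

theorem pvBal_le_M (p : List (List Int)) : pvBal p ≤ pvM p := by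
  induction p using List.reverseRecOn with
  | nil => simp [pvBal, pvM, solutionLens]
  | append_singleton p op ih =>
      rw [pvBal_append_singleton, pvM_append_singleton]
      exact le_max_right _ _

theorem pvCandAt_append_singleton (p : List (List Int)) (op : List Int) (m : Int) :
    pvCandAt (p ++ [op]) m =
      pvCandAt p m ++
        (if PySem.List.pyGetD op 0 0 == 1 && (pvBal p + pvDelta op) == m
         then [PySem.List.pyGetD op 1 0] else []) := by
  unfold pvCandAt
  rw [pvLens_append, List.zip_append (by rw [pvLens_length]), List.filterMap_append]
  congr 1
  simp only [solutionLens, pvDelta, zero_add, List.zip_cons_cons, List.zip_nil_right,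
    List.filterMap_cons, List.filterMap_nil]
  by_cases h1 : PySem.List.pyGetD op 0 0 = 1
  · by_cases h2 : pvBal p + 1 = m <;> simp [h1, h2]
  · simp [h1]

theorem pvCandAt_gt_max (p : List (List Int)) (m : Int) (hm : pvM p < m) :
    pvCandAt p m = [] := by
  unfold pvCandAt
  rw [List.filterMap_eq_nil_iff]
  intro x hx
  have h2 := (PySem.List.le_foldl_max (solutionLens 0 p) 0).2 x.2 (List.of_mem_zip hx).2
  have hne : (x.2 == m) = false := by
    simp only [beq_eq_false_iff_ne, ne_eq]
    intro h; rw [h] at h2; exact absurd (lt_of_le_of_lt h2 hm) (lt_irrefl _)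
  simp [hne]

def pvMin (p : List (List Int)) : Int :=
  match pvCandAt p (pvM p) with
  | [] => 0
  | h :: t => t.foldl min h

theorem pvInv (p : List (List Int)) (hb : ∀ k, 0 ≤ pvBal (p.take k)) :
    (p.foldl solutionStep ((0, 0), [])).1 = (pvM p, pvMin p)
    ∧ ((p.foldl solutionStep ((0, 0), [])).2.length : Int) = pvBal p
    ∧ (pvM p = 0 → pvCandAt p (pvM p) = [])
    ∧ (pvM p ≠ 0 → pvCandAt p (pvM p) ≠ []) := by
  induction p using List.reverseRecOn with
  | nil => exact ⟨rfl, rfl, fun _ => rfl, fun h => absurd rfl h⟩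
  | append_singleton p op ih =>
    have hbp : ∀ k, 0 ≤ pvBal (p.take k) := by
      intro k
      by_cases hk : k ≤ p.length
      · have h := hb k; rwa [List.take_append_of_le_length hk] at h
      · have h := hb p.length
        rw [List.take_append_of_le_length (le_refl _), List.take_length] at h
        rwa [List.take_of_length_le (by omega)]
    obtain ⟨ihm, ihq, ihc0, ihc1⟩ := ih hbp
    have hbalp : 0 ≤ pvBal p := by
      have h := hbp p.length; rwa [List.take_length] at h
    rw [List.foldl_append]
    simp only [List.foldl_cons, List.foldl_nil]
    set S := p.foldl solutionStep ((0, 0), ([] : List Int)) with hS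
    by_cases hpush : (PySem.List.pyGetD op 0 0 == 1) = true
    · -- append operation
      have hδ : pvDelta op = 1 := by simp [pvDelta, hpush]
      set v := PySem.List.pyGetD op 1 0 with hv
      have hql : ((S.2 ++ [v]).length : Int) = pvBal p + 1 := by
        simp [List.length_append]; omega
      have hlast : PySem.List.pyGetD (S.2 ++ [v]) (((S.2 ++ [v]).length : Int) - 1) 0 = v := by
        have e : ((S.2 ++ [v]).length : Int) - 1 = ((S.2.length : Nat) : Int) := by
          simp [List.length_append]
        rw [e, PySem.List.pyGetD_natCast]
        simp
      have hlast2 : PySem.List.pyGetD (S.2 ++ [v]) (pvBal p + 1 - 1) 0 = v := by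
        rw [← hql]; exact hlast
      have hstep : solutionStep S op =
          (if (pvM p) < pvBal p + 1 then ((pvBal p + 1, v), S.2 ++ [v])
           else if pvBal p + 1 = pvM p then
             (if v < pvMin p then ((pvM p, v), S.2 ++ [v]) else ((pvM p, pvMin p), S.2 ++ [v]))
           else ((pvM p, pvMin p), S.2 ++ [v])) := by
        unfold solutionStep
        rw [if_pos hpush]
        simp only [← hv, ihm, hql, hlast2, beq_iff_eq]
      rw [hstep]
      rw [pvM_append_singleton, pvCandAt_append_singleton, pvBal_append_singleton, hδ]
      by_cases h1 : pvM p < pvBal p + 1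
      · have hM' : max (pvM p) (pvBal p + 1) = pvBal p + 1 := max_eq_right h1.le
        have hcand : pvCandAt p (pvBal p + 1) = [] := pvCandAt_gt_max _ _ h1
        have hc' : (if (PySem.List.pyGetD op 0 0 == 1 && ((pvBal p + 1) == (pvBal p + 1))) = true then [v] else []) = [v] := by
          simp [hpush]
        rw [if_pos h1, hM', hc', hcand, List.nil_append]
        refine ⟨?_, hql, fun h => by omega, fun _ => by simp⟩
        unfold pvMin
        rw [pvM_append_singleton, pvCandAt_append_singleton, hδ, hM', hc', hcand, List.nil_append]
        rfl
      · rw [if_neg h1]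
        have hM' : max (pvM p) (pvBal p + 1) = pvM p := max_eq_left (by omega)
        rw [hM']
        by_cases h2 : pvBal p + 1 = pvM p
        · rw [if_pos h2]
          have hMpos : pvM p ≠ 0 := by omega
          obtain ⟨hd, tl, hcp⟩ : ∃ hd tl, pvCandAt p (pvM p) = hd :: tl := by
            rcases hx : pvCandAt p (pvM p) with _ | ⟨hd, tl⟩
            · exact absurd hx (ihc1 hMpos)
            · exact ⟨hd, tl, rfl⟩
          have hmp : pvMin p = tl.foldl min hd := by unfold pvMin; rw [hcp]
          have hc' : (if (PySem.List.pyGetD op 0 0 == 1 && ((pvBal p + 1) == (pvM p))) = true then [v] else []) = [v] := by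
            simp [hpush, h2]
          rw [hc', hcp]
          have hmin' : pvMin (p ++ [op]) = min (tl.foldl min hd) v := by
            unfold pvMin
            rw [pvM_append_singleton, pvCandAt_append_singleton, hδ, hM', hc', hcp]
            simp [List.foldl_append]
          by_cases hvm : v < pvMin p
          · rw [if_pos hvm]
            refine ⟨?_, hql, fun h => absurd h hMpos, fun _ => by simp⟩
            rw [hmin', min_eq_right (by rw [hmp] at hvm; exact hvm.le)]
          · rw [if_neg hvm]
            refine ⟨?_, hql, fun h => absurd h hMpos, fun _ => by simp⟩
            rw [hmin', min_eq_left (by rw [hmp] at hvm; omega), ← hmp]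
        · rw [if_neg h2]
          have hc' : (if (PySem.List.pyGetD op 0 0 == 1 && ((pvBal p + 1) == (pvM p))) = true then [v] else []) = [] := by
            simp [hpush, h2]
          rw [hc', List.append_nil]
          have hMpos : pvM p ≠ 0 := by omega
          refine ⟨?_, hql, fun h => absurd h hMpos, fun _ => ihc1 hMpos⟩
          unfold pvMin
          rw [pvM_append_singleton, pvCandAt_append_singleton, hδ, hM', hc', List.append_nil]
    · -- popleft operation
      have hδ : pvDelta op = -1 := by simp [pvDelta, hpush]
      have hL : 0 ≤ pvBal p - 1 := by
        have h := hb (p.length + 1)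
        rw [List.take_of_length_le (by simp)] at h
        rw [pvBal_append_singleton, hδ] at h
        omega
      have hq1 : 1 ≤ S.2.length := by omega
      have hstep : solutionStep S op = ((pvM p, pvMin p), S.2.tail) := by
        unfold solutionStep
        rw [if_neg (by simp_all), ihm]
      rw [hstep]
      have hM' : pvM (p ++ [op]) = pvM p := by
        rw [pvM_append_singleton, hδ]
        exact max_eq_left (by have := pvBal_le_M p; omega)
      have hcand' : pvCandAt (p ++ [op]) (pvM (p ++ [op])) = pvCandAt p (pvM p) := by
        rw [hM', pvCandAt_append_singleton]
        have hc0 : (PySem.List.pyGetD op 0 0 == 1) = false := by simp_all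
        simp [hc0]
      have htail : ((S.2.tail).length : Int) = pvBal (p ++ [op]) := by
        rw [pvBal_append_singleton, hδ]
        simp [List.length_tail]
        omega
      refine ⟨?_, htail, ?_, ?_⟩
      · have hmm : pvMin (p ++ [op]) = pvMin p := by
          unfold pvMin
          rw [hcand']
        rw [hM', hmm]
      · rw [hcand', hM']; exact ihc0
      · rw [hcand', hM']; exact ihc1

theorem pvDelta_eq : pvDelta = fun op => if PySem.List.pyGetD op 0 0 = 1 then (1 : Int) else -1 := by
  funext op; simp [pvDelta]

theorem pvMain (n : Int) (A : List (List Int)) (hPre : Pre_solution n A) :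
    solution n A = solution_alt n A := by
  have hb : ∀ k, 0 ≤ pvBal (A.take k) := by
    intro k
    by_cases hk : k ≤ A.length
    · have h := hPre.2 k (by omega)
      simpa [pvBal, pvDelta_eq] using h
    · have h := hPre.2 A.length (by omega)
      rw [List.take_of_length_le (by omega)]
      simpa [pvBal, pvDelta_eq] using h
  obtain ⟨hm, hq, hc0, hc1⟩ := pvInv A hb
  have hmax : (PySem.List.max? (solutionLens 0 A) (fun y => y)).getD 0 = pvM A := by
    rcases hls : solutionLens 0 A with _ | ⟨h, t⟩
    · simp [pvM, hls, PySem.List.max?]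
    · rw [PySem.List.max?_id_cons]
      have hh : 0 ≤ h := by
        have hmem : h ∈ solutionLens 0 A := by rw [hls]; exact List.mem_cons_self ..
        obtain ⟨k, hk0, hkl, hkx⟩ := pvLens_mem A 0 h hmem
        have := hb k; omega
      simp [pvM, hls, max_eq_right hh]
  simp only [solution, solution_alt]
  rw [hmax]
  by_cases hM0 : pvM A = 0
  · rw [if_pos hM0]
    have hz : pvMin A = 0 := by unfold pvMin; rw [hc0 hM0]
    simp [hm, hz, hM0]
  · rw [if_neg hM0]
    obtain ⟨hd, tl, hcp⟩ : ∃ hd tl, pvCandAt A (pvM A) = hd :: tl := by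
      rcases hx : pvCandAt A (pvM A) with _ | ⟨hd, tl⟩
      · exact absurd hx (hc1 hM0)
      · exact ⟨hd, tl, rfl⟩
    have hcB : (A.zip (solutionLens 0 A)).filterMap
        (fun p => if PySem.List.pyGetD p.1 0 0 == 1 && p.2 == pvM A then some (PySem.List.pyGetD p.1 1 0) else none) = hd :: tl := hcp
    rw [hcB, PySem.List.min?_id_cons]
    have hminA : pvMin A = tl.foldl min hd := by unfold pvMin; rw [hcp]
    simp [hm, hminA]

-- ===== VERDICT (by name: the statement is the Claim_ definition above) =====
theorem solution_spec : Claim_equal_solution := by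
  intro n A _ hPre
  unfold Spec_solution
  exact pvMain n A hPre
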